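-- pv_equiv track=rewrite | github.com/Steve973/pychub2 | src/pychub/package/domain/project_model.py | _parse_metadata_entries
-- ===== SOURCE A (Python) =====
-- def _parse_metadata_entries(entries: list[str] | None) -> dict[str, list[str]]:
--     """
--     Parses a list of metadata entries into a dictionary where keys are metadata
--     keys and values are lists of associated values. Handles splitting entries into
--     key-value pairs, cleaning whitespace, and merging multiple occurrences of the
--     same key.
--
--     Args:
--         entries (list[str] | None): A list of metadata entries as strings. Each
--             entry should be in the format `<key>=<value1>,<value2>,...`. If None
--             or an empty list is provided, an empty dictionary is returned.
--
--     Returns: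
--         dict[str, list[str]]: A dictionary mapping metadata keys to a list of their
--         associated values. Keys are strings, and values are lists of unique strings
--         without duplicates.
--     """
--     if not entries:
--         return {}
--
--     result: dict[str, list[str]] = {}
--     for raw in entries:
--         raw = raw.strip()
--         # Split into key and the rest once
--         if "=" in raw:
--             key, values_str = raw.split("=", 1)
--             key = key.strip()
--             values_str = values_str.strip()
--         else:
--             key = raw
--             values_str = ""
--         vals = [v.strip() for v in values_str.split(",")] if values_str else []
--         # merge multiple entries for the same key
--         bucket = result.setdefault(key, [])
--         for v in vals:
--             if v and v not in bucket:
--                 bucket.append(v)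
--     return result
-- ===== SOURCE B (Python) =====
-- def _split_entry(raw):
--     raw = raw.strip()
--     if "=" in raw:
--         key, values_str = raw.split("=", 1)
--         key, values_str = key.strip(), values_str.strip()
--     else:
--         key, values_str = raw, ""
--     return key, ([v.strip() for v in values_str.split(",")] if values_str else [])
--
--
-- def _parse_metadata_entries(entries):
--     if not entries:
--         return {}
--     # stage 1: parse every entry once
--     parsed = [_split_entry(raw) for raw in entries]
--     # stage 2: flatten to (key, value) pairs, dropping empty values, and dedup the PAIRS globally
--     pairs = [(key, v) for key, vals in parsed for v in vals if v]
--     # stage 3: register every key (first-seen order), then group the deduped pairs back per key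
--     result = {key: [] for key, _ in parsed}
--     for key, v in dict.fromkeys(pairs):
--         result[key].append(v)
--     return result
-- ===== Notes on version B (the rewrite author's own statement) =====
-- stated objective: alternative
-- what changed: B replaces A's single dict-threading pass with inline per-bucket membership-checked appends by a staged pipeline: parse all entries into (key, vals) pairs, flatten to a global (key, value) pair list dropping empties, dedup the pairs once globally with dict.fromkeys, then group the deduped pairs back per key in one linear pass over a dict pre-seeded with every key.
import Mathlib
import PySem

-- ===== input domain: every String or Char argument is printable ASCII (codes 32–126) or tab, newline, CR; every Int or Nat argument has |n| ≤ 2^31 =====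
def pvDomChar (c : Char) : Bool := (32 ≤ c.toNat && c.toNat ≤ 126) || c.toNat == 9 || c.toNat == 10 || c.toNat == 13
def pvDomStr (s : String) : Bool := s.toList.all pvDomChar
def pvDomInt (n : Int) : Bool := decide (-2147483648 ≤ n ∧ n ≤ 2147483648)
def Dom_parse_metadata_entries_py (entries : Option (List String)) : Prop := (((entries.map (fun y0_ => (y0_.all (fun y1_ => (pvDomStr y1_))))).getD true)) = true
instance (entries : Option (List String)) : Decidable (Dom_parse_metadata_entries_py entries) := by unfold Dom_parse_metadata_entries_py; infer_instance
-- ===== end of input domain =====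

-- B replaces A's single dict-threading pass with inline per-bucket dedup by a staged pipeline:
-- parse all entries, flatten to (key, value) pairs, dedup the pairs GLOBALLY once, then group the
-- deduped pairs back per key in one pass; objective: alternative.

-- the per-entry parsing both Pythons perform verbatim (_split_entry in Source B, inlined in A's loop):
-- strip, split on '=' once, strip key and values, per-entry value list (empty when no values string)
def pvParse (raw0 : String) : String × List String :=
  let raw := PySem.Str.strip raw0
  let kv : String × String :=
    if PySem.Str.isIn "=" raw then
      let parts := (PySem.Str.splitMax? raw "=" 1).getD []
      (PySem.Str.strip (parts.getD 0 ""), PySem.Str.strip (parts.getD 1 ""))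
    else (raw, "")
  (kv.1, if kv.2 ≠ "" then ((PySem.Str.split? kv.2 ",").getD []).map PySem.Str.strip else [])

-- ===== PORT A =====
-- one iteration of A's loop body (the dict is threaded as the fold state)
def pvStepA (d : PySem.Dict String (List String)) (raw0 : String) : PySem.Dict String (List String) :=
  let p := pvParse raw0
  -- bucket = result.setdefault(key, []); for v in vals: if v and v not in bucket: bucket.append(v)
  let d1 := d.setdefault p.1 []
  let bucket := d1.getD p.1 []
  d1.insert p.1 (p.2.foldl (fun b v => if v ≠ "" ∧ v ∉ b then b ++ [v] else b) bucket)

def parse_metadata_entries_py (entries : Option (List String)) : List (String × List String) :=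
  match entries with
  | none => []
  | some es => if es.isEmpty then [] else (es.foldl pvStepA PySem.Dict.empty).items

-- ===== PORT B =====
-- pairs = [(key, v) for key, vals in parsed for v in vals if v]   (parsed = [_split_entry(raw) for raw in entries])
def pvPairs (es : List String) : List (String × String) :=
  (es.map pvParse).flatMap (fun p => (p.2.filter (fun v => v ≠ "")).map (fun v => (p.1, v)))

-- result = {key: [] for key, _ in parsed}
def pvInitDict (es : List String) : PySem.Dict String (List String) :=
  (es.map pvParse).foldl (fun d p => d.insert p.1 ([] : List String)) PySem.Dict.empty

def parse_metadata_entries_py_alt (entries : Option (List String)) : List (String × List String) :=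
  match entries with
  | none => []
  | some es =>
    if es.isEmpty then []
    else
      -- for key, v in dict.fromkeys(pairs): result[key].append(v)
      -- (key is always present in result, so the append is result[key] = result[key] + [v])
      ((PySem.List.dedup (pvPairs es)).foldl
        (fun d q => d.modify q.1 [] (· ++ [q.2])) (pvInitDict es)).items

-- ===== PRECONDITION & SPEC =====
def Spec_parse_metadata_entries_py (entries : Option (List String)) (out : List (String × List String)) : Prop := out = parse_metadata_entries_py_alt entries
instance (entries : Option (List String)) (out : List (String × List String)) : Decidable (Spec_parse_metadata_entries_py entries out) := by unfold Spec_parse_metadata_entries_py; infer_instance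

-- ===== CLAIM (what is proved, stated in full; the proofs are below) =====
def Claim_equal_parse_metadata_entries_py : Prop := ∀ (entries : Option (List String)), Dom_parse_metadata_entries_py entries → Spec_parse_metadata_entries_py entries (parse_metadata_entries_py entries)

-- ===== LEMMAS AND PROOFS =====

-- all non-empty values of the entries whose key is k, in entry order
def pvCollect (es : List String) (k : String) : List String :=
  (((es.map pvParse).filter (fun p => p.1 == k)).flatMap (fun p => p.2)).filter (fun v => v ≠ "")

theorem pvCollect_cons (raw : String) (es : List String) (k : String) :
    pvCollect (raw :: es) k
      = (if (pvParse raw).1 = k then (pvParse raw).2.filter (fun v => v ≠ "") else [])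
        ++ pvCollect es k := by
  unfold pvCollect
  simp only [List.map_cons, List.filter_cons]
  by_cases h : (pvParse raw).1 = k
  · rw [if_pos (by simpa using h), if_pos h]
    simp
  · rw [if_neg (by simpa using h), if_neg h]
    simp

-- setdefault-then-overwrite at the same key is Python's d[k] = f(d.get(k, []))
theorem pv_setdefault_insert_eq_modify (d : PySem.Dict String (List String)) (k : String)
    (f : List String → List String) :
    (d.setdefault k []).insert k (f ((d.setdefault k []).getD k [])) = d.modify k [] f := by
  by_cases h : d.contains k = true
  · rw [PySem.Dict.setdefault_of_contains d [] h]; rfl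
  · have h' : d.contains k = false := by simpa using h
    rw [PySem.Dict.setdefault_of_not_contains d [] h', PySem.Dict.getD_insert_self,
      PySem.Dict.insert_insert_self]
    unfold PySem.Dict.modify
    rw [PySem.Dict.getD_of_not_contains d [] h']

theorem pvStepA_eq (d : PySem.Dict String (List String)) (raw : String) :
    pvStepA d raw
      = d.modify (pvParse raw).1 []
          (fun b => (pvParse raw).2.foldl (fun b v => if v ≠ "" ∧ v ∉ b then b ++ [v] else b) b) := by
  unfold pvStepA
  exact pv_setdefault_insert_eq_modify d (pvParse raw).1
    (fun b => (pvParse raw).2.foldl (fun b v => if v ≠ "" ∧ v ∉ b then b ++ [v] else b) b)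

-- A's inline dedup-append loop over vals equals deduping after appending the non-empty values
theorem pvFoldA_ofList (vals : List String) (L : List String) :
    vals.foldl (fun b v => if v ≠ "" ∧ v ∉ b then b ++ [v] else b) (PySem.Set.ofList L)
      = PySem.Set.ofList (L ++ vals.filter (fun v => v ≠ "")) := by
  induction vals generalizing L with
  | nil => simp
  | cons v vs ih =>
    simp only [List.foldl_cons, List.filter_cons]
    by_cases hv : v = ""
    · subst hv
      rw [if_neg (by simp), if_neg (by simp)]
      exact ih L
    · have hstep : (if v ≠ "" ∧ v ∉ PySem.Set.ofList L then PySem.Set.ofList L ++ [v]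
          else PySem.Set.ofList L) = PySem.Set.ofList (L ++ [v]) := by
        rw [PySem.Set.ofList_append_singleton, PySem.Set.add_eq_ite]
        by_cases hm : v ∈ PySem.Set.ofList L
        · rw [if_neg (by simp [hm]), if_pos hm]
        · rw [if_pos ⟨hv, hm⟩, if_neg hm]
      rw [hstep, ih (L ++ [v]), if_pos (by simpa using hv)]
      simp [List.append_assoc]

-- invariant of A's fold: each bucket is the ordered dedup of an accumulated prefix plus pvCollect
theorem pvFoldl_getD (es : List String) (d : PySem.Dict String (List String))
    (g : String → List String) (h : ∀ k, d.getD k [] = PySem.Set.ofList (g k)) (k : String) :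
    (es.foldl pvStepA d).getD k [] = PySem.Set.ofList (g k ++ pvCollect es k) := by
  induction es generalizing d g with
  | nil => simpa [pvCollect] using h k
  | cons raw es ih =>
    simp only [List.foldl_cons]
    rw [pvCollect_cons, ← List.append_assoc]
    refine ih (pvStepA d raw)
      (fun k => g k ++ (if (pvParse raw).1 = k then (pvParse raw).2.filter (fun v => v ≠ "") else []))
      (fun k => ?_)
    rw [pvStepA_eq, PySem.Dict.getD_modify]
    beta_reduce
    by_cases hk : k = (pvParse raw).1
    · rw [if_pos hk, hk, if_pos rfl, h (pvParse raw).1]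
      exact pvFoldA_ofList _ _
    · rw [if_neg hk, if_neg (fun e => hk (Eq.symm e)), List.append_nil]
      exact h k

theorem pvKeysA (es : List String) :
    (es.foldl pvStepA PySem.Dict.empty).keys
      = PySem.List.dedup ((es.map pvParse).map (fun p => p.1)) := by
  have hA : pvStepA = fun d raw => d.modify (pvParse raw).1 []
      (fun b => (pvParse raw).2.foldl (fun b v => if v ≠ "" ∧ v ∉ b then b ++ [v] else b) b) := by
    funext d raw; exact pvStepA_eq d raw
  rw [hA, PySem.Dict.keys_foldl_modify_key es (fun raw => (pvParse raw).1) []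
      (fun _ raw b => (pvParse raw).2.foldl (fun b v => if v ≠ "" ∧ v ∉ b then b ++ [v] else b) b) _]
  simp only [PySem.List.dedup_eq_ofList, PySem.Set.update, PySem.Set.ofList_eq_foldl,
    PySem.Dict.keys, PySem.Dict.empty, List.map_map, List.map_nil]
  rfl

theorem pvNodupA (es : List String) : (es.foldl pvStepA PySem.Dict.empty).keys.Nodup := by
  have hA : pvStepA = fun d raw => d.modify (pvParse raw).1 []
      (fun b => (pvParse raw).2.foldl (fun b v => if v ≠ "" ∧ v ∉ b then b ++ [v] else b) b) := by
    funext d raw; exact pvStepA_eq d raw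
  rw [hA]
  exact PySem.Dict.nodup_keys_foldl_modify_key _ _ _ _ _ (by simp)

-- ----- B-side lemmas -----

-- dedup (= Set.ofList) commutes with filter
theorem pvOfList_filter {a : Type} [BEq a] [LawfulBEq a] (p : a → Bool) (l : List a) :
    List.filter p (PySem.Set.ofList l) = PySem.Set.ofList (l.filter p) := by
  induction l using List.reverseRecOn with
  | nil => rfl
  | append_singleton xs x ih =>
    rw [List.filter_append, PySem.Set.ofList_append_singleton]
    by_cases hm : x ∈ PySem.Set.ofList xs
    · have hx : x ∈ xs := (PySem.Set.mem_ofList xs x).mp hm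
      rw [PySem.Set.add_of_mem hm, ih]
      by_cases hp : p x = true
      · rw [show List.filter p [x] = [x] by simp [hp], PySem.Set.ofList_append_singleton,
          PySem.Set.add_of_mem ((PySem.Set.mem_ofList _ x).mpr (List.mem_filter.mpr ⟨hx, hp⟩))]
      · rw [show List.filter p [x] = [] by simp [hp], List.append_nil]
    · rw [PySem.Set.add_of_not_mem hm, List.filter_append, ih]
      by_cases hp : p x = true
      · have hnx : x ∉ PySem.Set.ofList (xs.filter p) := fun h =>
          hm ((PySem.Set.mem_ofList xs x).mpr
            (List.mem_filter.mp ((PySem.Set.mem_ofList _ x).mp h)).1)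
        rw [show List.filter p [x] = [x] by simp [hp], PySem.Set.ofList_append_singleton,
          PySem.Set.add_of_not_mem hnx]
      · rw [show List.filter p [x] = [] by simp [hp], List.append_nil, List.append_nil]

-- dedup commutes with tagging every element by the same key (an injective map)
theorem pvOfList_map_mk (k : String) (l : List String) :
    PySem.Set.ofList (l.map (fun v => (k, v))) = (PySem.Set.ofList l).map (fun v => (k, v)) := by
  induction l using List.reverseRecOn with
  | nil => rfl
  | append_singleton xs x ih =>
    rw [List.map_append, List.map_singleton, PySem.Set.ofList_append_singleton,
      PySem.Set.ofList_append_singleton, ih]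
    by_cases hm : x ∈ PySem.Set.ofList xs
    · rw [PySem.Set.add_of_mem hm, PySem.Set.add_of_mem (List.mem_map.mpr ⟨x, hm, rfl⟩)]
    · have hnot : (k, x) ∉ (PySem.Set.ofList xs).map (fun v => (k, v)) := by
        intro h
        obtain ⟨y, hy, he⟩ := List.mem_map.mp h
        cases he
        exact hm hy
      rw [PySem.Set.add_of_not_mem hm, PySem.Set.add_of_not_mem hnot, List.map_append,
        List.map_singleton]

theorem pvPairs_cons (raw : String) (es : List String) :
    pvPairs (raw :: es)
      = ((pvParse raw).2.filter (fun v => v ≠ "")).map (fun v => ((pvParse raw).1, v))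
        ++ pvPairs es := by
  unfold pvPairs
  rw [List.map_cons, List.flatMap_cons]

-- the global pair list restricted to key k is exactly pvCollect es k tagged with k
theorem pvPairs_filter (es : List String) (k : String) :
    (pvPairs es).filter (fun q => q.1 == k) = (pvCollect es k).map (fun v => (k, v)) := by
  induction es with
  | nil => rfl
  | cons raw es ih =>
    rw [pvPairs_cons, List.filter_append, ih, pvCollect_cons, List.map_append]
    by_cases hk : (pvParse raw).1 = k
    · simp [List.filter_map, Function.comp_def, hk]
    · simp [List.filter_map, Function.comp_def, hk]

-- adding elements already present leaves a set unchanged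
theorem pvUpdate_of_subset {a : Type} [BEq a] [LawfulBEq a] (s : PySem.Set a) (l : List a)
    (h : ∀ x ∈ l, x ∈ s) : PySem.Set.update s l = s := by
  induction l with
  | nil => rfl
  | cons x xs ih =>
    rw [PySem.Set.update_cons, PySem.Set.add_of_mem (h x (by simp))]
    exact ih (fun y hy => h y (by simp [hy]))

-- the key-registration pass maps every key to []
theorem pvInitDict_getD (es : List String) (k : String) : (pvInitDict es).getD k [] = [] := by
  unfold pvInitDict
  generalize (es.map pvParse) = ps
  have : ∀ (d : PySem.Dict String (List String)), d.getD k [] = [] →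
      (ps.foldl (fun d p => d.insert p.1 ([] : List String)) d).getD k [] = [] := by
    induction ps with
    | nil => exact fun d h => h
    | cons p ps ih =>
      intro d h
      simp only [List.foldl_cons]
      refine ih _ ?_
      rw [PySem.Dict.getD_insert]
      split_ifs with hh
      · rfl
      · exact h
  exact this PySem.Dict.empty (PySem.Dict.getD_empty _ _)

theorem pvInitDict_keys (es : List String) :
    (pvInitDict es).keys = PySem.Set.ofList ((es.map pvParse).map (fun p => p.1)) := by
  unfold pvInitDict
  rw [PySem.Dict.keys_foldl_insert_key (es.map pvParse) (fun p => p.1)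
    (fun _ _ => ([] : List String)) PySem.Dict.empty, PySem.Dict.keys_empty]
  exact (PySem.Set.ofList_eq_foldl _).symm

theorem pvKeysB (es : List String) :
    ((PySem.List.dedup (pvPairs es)).foldl
        (fun d q => d.modify q.1 [] (· ++ [q.2])) (pvInitDict es)).keys
      = PySem.List.dedup ((es.map pvParse).map (fun p => p.1)) := by
  rw [PySem.Dict.keys_foldl_modify_key (PySem.List.dedup (pvPairs es)) (fun q => q.1) []
    (fun _ q b => b ++ [q.2]) (pvInitDict es), pvInitDict_keys]
  rw [pvUpdate_of_subset]
  · rw [PySem.List.dedup_eq_ofList]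
  · intro x hx
    obtain ⟨q, hq, rfl⟩ := List.mem_map.mp hx
    rw [PySem.List.mem_dedup] at hq
    rw [PySem.Set.mem_ofList]
    unfold pvPairs at hq
    simp only [List.mem_flatMap, List.mem_map] at hq ⊢
    obtain ⟨p, hp, v, hv, rfl⟩ := hq
    exact ⟨p, hp, rfl⟩

theorem pvNodupB (es : List String) :
    ((PySem.List.dedup (pvPairs es)).foldl
        (fun d q => d.modify q.1 [] (· ++ [q.2])) (pvInitDict es)).keys.Nodup := by
  refine PySem.Dict.nodup_keys_foldl_modify_key _ _ _ _ _ ?_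
  rw [pvInitDict_keys]
  exact PySem.Set.nodup_ofList _

-- B's bucket for k: dedup the global pair list, restrict to k, drop the tags
theorem pvGetDB (es : List String) (k : String) :
    ((PySem.List.dedup (pvPairs es)).foldl
        (fun d q => d.modify q.1 [] (· ++ [q.2])) (pvInitDict es)).getD k []
      = PySem.Set.ofList (pvCollect es k) := by
  rw [PySem.Dict.getD_foldl_modify_append, pvInitDict_getD, List.nil_append,
    PySem.List.dedup_eq_ofList, pvOfList_filter, pvPairs_filter, pvOfList_map_mk]
  simp

-- ===== VERDICT (by name: the statement is the Claim_ definition above) =====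
theorem parse_metadata_entries_py_spec : Claim_equal_parse_metadata_entries_py := by
  intro entries _
  unfold Spec_parse_metadata_entries_py parse_metadata_entries_py parse_metadata_entries_py_alt
  cases entries with
  | none => rfl
  | some es =>
    simp only []
    by_cases he : es.isEmpty = true
    · rw [if_pos he, if_pos he]
    · rw [if_neg he, if_neg he]
      rw [PySem.Dict.items_eq_map_keys _ (pvNodupA es) ([] : List String), pvKeysA es,
        PySem.Dict.items_eq_map_keys _ (pvNodupB es) ([] : List String), pvKeysB es]
      apply List.map_congr_left
      intro k _
      refine congrArg (Prod.mk k) ?_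
      have hA := pvFoldl_getD es PySem.Dict.empty (fun _ => [])
        (fun k => by simp [PySem.Dict.getD_empty, PySem.Set.ofList]) k
      simp only [List.nil_append] at hA
      rw [hA, pvGetDB es k]
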